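-- pv_equiv track=rewrite | github.com/MAKhodayari/CryptoMathEX02 | main.py | ModularDivision
-- ===== SOURCE A (Python) =====
-- def ModularDivision(Rows, Divisor):
--     Remainders = list()
--     for Row in Rows:
--         Temp1 = list()
--         for Mat in Row:
--             Temp2 = list()
--             for Col in Mat:
--                 Temp3 = list()
--                 for Num in Col:
--                     Temp3.append(Num % Divisor)
--                 Temp2.append(Temp3)
--             Temp1.append(Temp2)
--         Remainders.append(Temp1)
--     return Remainders
-- ===== SOURCE B (Python) =====
-- def ModularDivision(Rows, Divisor):
--     def rec(node, depth):
--         if depth == 0: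
--             return node % Divisor
--         return [rec(child, depth - 1) for child in node]
--     return rec(Rows, 4)
-- ===== Notes on version B (the rewrite author's own statement) =====
-- stated objective: simpler
-- what changed: Replaces the four hard-coded nested append loops with a single recursive depth-counting deep-map helper applied at depth 4.
import Mathlib
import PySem

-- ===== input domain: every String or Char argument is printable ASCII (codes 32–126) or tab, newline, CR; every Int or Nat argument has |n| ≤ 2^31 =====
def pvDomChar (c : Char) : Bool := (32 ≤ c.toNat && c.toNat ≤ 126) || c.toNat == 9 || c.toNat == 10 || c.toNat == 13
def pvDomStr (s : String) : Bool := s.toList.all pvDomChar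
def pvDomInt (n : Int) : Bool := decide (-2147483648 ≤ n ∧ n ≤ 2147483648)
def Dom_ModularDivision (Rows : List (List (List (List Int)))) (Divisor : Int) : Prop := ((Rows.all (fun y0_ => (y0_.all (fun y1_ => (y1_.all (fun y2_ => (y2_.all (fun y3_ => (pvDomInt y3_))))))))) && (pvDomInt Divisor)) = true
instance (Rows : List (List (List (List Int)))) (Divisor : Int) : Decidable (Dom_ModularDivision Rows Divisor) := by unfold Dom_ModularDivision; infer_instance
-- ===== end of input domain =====

-- B replaces A's four hard-coded nested append loops by one recursive depth-counted deep-map (simpler decomposition, same cost).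

-- ===== PORT A =====
def ModularDivision (Rows : List (List (List (List Int)))) (Divisor : Int) : List (List (List (List Int))) :=
  Rows.foldl (fun Remainders Row =>
    Remainders ++ [Row.foldl (fun Temp1 Mat =>
      Temp1 ++ [Mat.foldl (fun Temp2 Col =>
        Temp2 ++ [Col.foldl (fun Temp3 Num =>
          Temp3 ++ [PySem.Int.mod Num Divisor]) []]) []]) []]) []

-- ===== PORT B =====
-- Source B's rec(node, depth) is one polymorphic recursion on a depth counter; Lean's typing
-- splits it into one helper per depth level, each the structural recursion building the
-- comprehension's list front-to-back (depth = 0 case is the leaf `node % Divisor`).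
def MD_rec1 (d : Int) : List Int → List Int
  | [] => []
  | n :: t => PySem.Int.mod n d :: MD_rec1 d t

def MD_rec2 (d : Int) : List (List Int) → List (List Int)
  | [] => []
  | c :: t => MD_rec1 d c :: MD_rec2 d t

def MD_rec3 (d : Int) : List (List (List Int)) → List (List (List Int))
  | [] => []
  | c :: t => MD_rec2 d c :: MD_rec3 d t

def MD_rec4 (d : Int) : List (List (List (List Int))) → List (List (List (List Int)))
  | [] => []
  | c :: t => MD_rec3 d c :: MD_rec4 d t

def ModularDivision_alt (Rows : List (List (List (List Int)))) (Divisor : Int) : List (List (List (List Int))) :=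
  MD_rec4 Divisor Rows

-- ===== PRECONDITION & SPEC =====
-- Pre_ excludes exactly the inputs where Python's `Num % 0` raises ZeroDivisionError:
-- Divisor = 0 with at least one innermost element present.
def Pre_ModularDivision (Rows : List (List (List (List Int)))) (Divisor : Int) : Prop :=
  Divisor ≠ 0 ∨ Rows.all (fun r => r.all (fun m => m.all (fun c => c.isEmpty))) = true
instance (Rows : List (List (List (List Int)))) (Divisor : Int) : Decidable (Pre_ModularDivision Rows Divisor) := by unfold Pre_ModularDivision; infer_instance

def pvWitness_ModularDivision : List (List (List (List Int))) × Int := ([[[[5, -3], [7]]], []], 3)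

def Spec_ModularDivision (Rows : List (List (List (List Int)))) (Divisor : Int) (out : List (List (List (List Int)))) : Prop := out = ModularDivision_alt Rows Divisor
instance (Rows : List (List (List (List Int)))) (Divisor : Int) (out : List (List (List (List Int)))) : Decidable (Spec_ModularDivision Rows Divisor out) := by unfold Spec_ModularDivision; infer_instance

-- ===== CLAIM (what is proved, stated in full; the proofs are below) =====
def Claim_equal_ModularDivision : Prop := ∀ (Rows : List (List (List (List Int)))) (Divisor : Int), Dom_ModularDivision Rows Divisor → Pre_ModularDivision Rows Divisor → Spec_ModularDivision Rows Divisor (ModularDivision Rows Divisor)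

-- ===== LEMMAS AND PROOFS =====

-- A's append-accumulator loop over any list equals acc ++ map.
theorem pv_foldl_append_map {α β : Type} (f : α → β) :
    ∀ (l : List α) (acc : List β),
      l.foldl (fun a x => a ++ [f x]) acc = acc ++ l.map f := by
  intro l
  induction l with
  | nil => simp
  | cons x t ih => intro acc; simp [List.foldl, ih]

theorem MD_rec1_eq_map (d : Int) :
    MD_rec1 d = List.map (fun n => PySem.Int.mod n d) := by
  funext l
  induction l with
  | nil => rfl
  | cons n t ih => simp [MD_rec1, ih]

theorem MD_rec2_eq_map (d : Int) :
    MD_rec2 d = List.map (MD_rec1 d) := by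
  funext l
  induction l with
  | nil => rfl
  | cons c t ih => simp [MD_rec2, ih]

theorem MD_rec3_eq_map (d : Int) :
    MD_rec3 d = List.map (MD_rec2 d) := by
  funext l
  induction l with
  | nil => rfl
  | cons c t ih => simp [MD_rec3, ih]

theorem MD_rec4_eq_map (d : Int) :
    MD_rec4 d = List.map (MD_rec3 d) := by
  funext l
  induction l with
  | nil => rfl
  | cons c t ih => simp [MD_rec4, ih]

-- ===== VERDICT (by name: the statement is the Claim_ definition above) =====
theorem ModularDivision_spec : Claim_equal_ModularDivision := by
  intro Rows Divisor _ _
  unfold Spec_ModularDivision ModularDivision ModularDivision_alt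
  simp only [pv_foldl_append_map, MD_rec4_eq_map, MD_rec3_eq_map, MD_rec2_eq_map,
    MD_rec1_eq_map, List.nil_append]
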